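-- pv_equiv track=rewrite | github.com/HogRider19/Tasks | CountThePhotos.py | count_photo_once
-- ===== SOURCE A (Python) =====
-- def count_photo_once(direction, road):
--     photo = 0
--     cameras = 0
--     for letter in road:
--         if letter == '.':
--             cameras += 1
--         elif letter == direction:
--             photo += cameras
--     return photo
-- ===== SOURCE B (Python) =====
-- def count_photo_once(direction, road):
--     # Divide and conquer: for a segment return (dots, dirs, pairs), where pairs
--     # counts (camera, direction-letter) pairs with the camera to the left.
--     # Merging halves adds dots_left * dirs_right cross pairs.
--     def go(lo, hi):
--         if hi - lo == 0:
--             return (0, 0, 0)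
--         if hi - lo == 1:
--             c = road[lo]
--             if c == '.':
--                 return (1, 0, 0)
--             if c == direction:
--                 return (0, 1, 0)
--             return (0, 0, 0)
--         mid = (lo + hi) // 2
--         d1, r1, p1 = go(lo, mid)
--         d2, r2, p2 = go(mid, hi)
--         return (d1 + d2, r1 + r2, p1 + p2 + d1 * r2)
--     return go(0, len(road))[2]
-- ===== Notes on version B (the rewrite author's own statement) =====
-- stated objective: alternative
-- what changed: B replaces A's single forward scan with a running camera counter by a divide-and-conquer recursion that computes (dots, dirs, pairs) for each half of the road and merges with dots_left * dirs_right cross pairs.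
import Mathlib
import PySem

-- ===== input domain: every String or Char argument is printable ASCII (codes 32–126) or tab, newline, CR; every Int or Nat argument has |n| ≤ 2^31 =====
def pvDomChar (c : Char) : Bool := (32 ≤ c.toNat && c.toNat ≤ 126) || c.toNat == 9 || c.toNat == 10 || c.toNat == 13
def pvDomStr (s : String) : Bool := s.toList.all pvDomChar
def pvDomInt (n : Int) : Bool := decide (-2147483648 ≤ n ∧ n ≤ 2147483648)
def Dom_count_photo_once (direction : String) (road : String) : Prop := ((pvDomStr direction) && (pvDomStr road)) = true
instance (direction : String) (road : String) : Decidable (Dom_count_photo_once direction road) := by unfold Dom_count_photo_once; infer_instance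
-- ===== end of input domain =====

-- B replaces A's forward scan with a divide-and-conquer over halves of the road,
-- merging (dots, dirs, pairs) triples ('alternative'; same O(n)-ish cost).

-- ===== PORT A =====
-- A: forward fold over the road, state (photo, cameras).
def count_photo_once (direction : String) (road : String) : Int :=
  (road.toList.foldl (fun (st : Int × Int) letter =>
      if letter = '.' then (st.1, st.2 + 1)
      else if String.mk [letter] = direction then (st.1 + st.2, st.2)
      else st) (0, 0)).1

-- ===== PORT B =====
-- B: divide and conquer on the char list, returning (dots, dirs, pairs);
-- halves are merged by adding dots_left * dirs_right cross pairs.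
def countPhotoGo (direction : String) (l : List Char) : Int × Int × Int :=
  match l with
  | [] => (0, 0, 0)
  | [c] =>
    if c = '.' then (1, 0, 0)
    else if String.mk [c] = direction then (0, 1, 0)
    else (0, 0, 0)
  | x :: y :: t =>
    let mid := (x :: y :: t).length / 2
    let L := countPhotoGo direction ((x :: y :: t).take mid)
    let R := countPhotoGo direction ((x :: y :: t).drop mid)
    (L.1 + R.1, L.2.1 + R.2.1, L.2.2 + R.2.2 + L.1 * R.2.1)
termination_by l.length
decreasing_by
  · simp [List.length_take]; omega
  · simp [List.length_drop]; omega

def count_photo_once_alt (direction : String) (road : String) : Int :=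
  (countPhotoGo direction road.toList).2.2

-- ===== PRECONDITION & SPEC =====
def Spec_count_photo_once (direction : String) (road : String) (out : Int) : Prop := out = count_photo_once_alt direction road
instance (direction : String) (road : String) (out : Int) : Decidable (Spec_count_photo_once direction road out) := by unfold Spec_count_photo_once; infer_instance

-- ===== CLAIM =====
def Claim_equal_count_photo_once : Prop := ∀ (direction : String) (road : String), Dom_count_photo_once direction road → Spec_count_photo_once direction road (count_photo_once direction road)

-- ===== LEMMAS AND PROOFS =====

-- number of '.' characters (cameras) in a char list, as an Int
def cntDot : List Char → Int
  | [] => 0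
  | ch :: t => (if ch = '.' then 1 else 0) + cntDot t

-- number of direction letters (a '.' never counts: A's elif priority), as an Int
def cntDir (direction : String) : List Char → Int
  | [] => 0
  | ch :: t => (if ch ≠ '.' ∧ String.mk [ch] = direction then 1 else 0) + cntDir direction t

-- pairs counted by A: for each camera, the direction letters strictly after it
def pairsA (direction : String) : List Char → Int
  | [] => 0
  | ch :: t => (if ch = '.' then cntDir direction t else 0) + pairsA direction t

theorem foldA_eq (direction : String) (l : List Char) : ∀ (p c : Int),
    (l.foldl (fun (st : Int × Int) letter =>
      if letter = '.' then (st.1, st.2 + 1)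
      else if String.mk [letter] = direction then (st.1 + st.2, st.2)
      else st) (p, c)) = (p + c * cntDir direction l + pairsA direction l, c + cntDot l) := by
  induction l with
  | nil => intro p c; simp [cntDir, cntDot, pairsA]
  | cons ch t ih =>
    intro p c
    by_cases hdot : ch = '.'
    · simp only [List.foldl_cons, hdot, ih]
      simp [cntDir, cntDot, pairsA]
      constructor <;> ring
    · by_cases hdir : String.mk [ch] = direction
      · simp only [List.foldl_cons, if_neg hdot, if_pos hdir, ih]
        simp [cntDir, cntDot, pairsA, hdot, hdir]
        ring
      · simp only [List.foldl_cons, if_neg hdot, if_neg hdir, ih]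
        simp [cntDir, cntDot, pairsA, hdot, hdir]

theorem cntDot_append (l m : List Char) :
    cntDot (l ++ m) = cntDot l + cntDot m := by
  induction l with
  | nil => simp [cntDot]
  | cons x t ih => simp [cntDot, ih]; ring

theorem cntDir_append (direction : String) (l m : List Char) :
    cntDir direction (l ++ m) = cntDir direction l + cntDir direction m := by
  induction l with
  | nil => simp [cntDir]
  | cons x t ih => simp [cntDir, ih]; ring

theorem pairsA_append (direction : String) (l m : List Char) :
    pairsA direction (l ++ m) =
      pairsA direction l + pairsA direction m + cntDot l * cntDir direction m := by
  induction l with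
  | nil => simp [pairsA, cntDot]
  | cons x t ih =>
    simp only [List.cons_append, pairsA, ih, cntDir_append, cntDot]
    by_cases hx : x = '.' <;> simp [hx] <;> ring

theorem countPhotoGo_eq (direction : String) (l : List Char) :
    countPhotoGo direction l = (cntDot l, cntDir direction l, pairsA direction l) := by
  fun_induction countPhotoGo direction l
  case case5 =>
    rename_i x y t mid L R ih1 ih2
    simp only [L, R, mid]
    conv_rhs => rw [← List.take_append_drop ((x :: y :: t).length / 2) (x :: y :: t)]
    rw [cntDot_append, cntDir_append, pairsA_append, ih1, ih2]
  all_goals simp_all [cntDot, cntDir, pairsA]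

-- ===== VERDICT =====
theorem count_photo_once_spec : Claim_equal_count_photo_once := by
  intro direction road _
  unfold Spec_count_photo_once count_photo_once count_photo_once_alt
  rw [foldA_eq, countPhotoGo_eq]
  simp
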